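-- pv_equiv track=rewrite | github.com/nsheaps/nsheaps | .github/scripts/generate-readme.py | generate_category_section
-- ===== SOURCE A (Python) =====
-- def generate_repo_card_html(repo: dict) -> str:
--     """Generate HTML for a single repo card with dark/light mode."""
--     name = repo["name"]
--     url = repo["url"]
--     return f"""<a href="{url}">
--         <picture>
--           <source media="(prefers-color-scheme: dark)" srcset="cards/{name}-dark.svg">
--           <img src="cards/{name}-light.svg" alt="{name}" width="400">
--         </picture>
--       </a>"""
--
-- def generate_category_section(heading: str, repos: list[dict]) -> str:
--     """Generate a category section with cards in a grid."""
--     lines = [f"### {heading}\n"]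
--     lines.append('<table><tr>')
--
--     for i, repo in enumerate(repos):
--         if i > 0 and i % 2 == 0:
--             lines.append("</tr><tr>")
--         lines.append(f"<td>\n      {generate_repo_card_html(repo)}\n    </td>")
--
--     lines.append("</tr></table>\n")
--     return "\n".join(lines)
-- ===== SOURCE B (Python) =====
-- def generate_repo_card_html(repo: dict) -> str:
--     """Generate HTML for a single repo card with dark/light mode."""
--     name = repo["name"]
--     url = repo["url"]
--     return f"""<a href="{url}">
--         <picture>
--           <source media="(prefers-color-scheme: dark)" srcset="cards/{name}-dark.svg">
--           <img src="cards/{name}-light.svg" alt="{name}" width="400">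
--         </picture>
--       </a>"""
--
-- def generate_category_section(heading: str, repos: list[dict]) -> str:
--     """Generate a category section with cards in a grid (rows of two)."""
--     chunks = []
--     rest = repos
--     while rest:
--         chunks.append(rest[:2])
--         rest = rest[2:]
--     lines = [f"### {heading}\n", '<table><tr>']
--     for ci, chunk in enumerate(chunks):
--         if ci > 0:
--             lines.append("</tr><tr>")
--         for repo in chunk:
--             lines.append(f"<td>\n      {generate_repo_card_html(repo)}\n    </td>")
--     lines.append("</tr></table>\n")
--     return "\n".join(lines)
-- ===== Notes on version B (the rewrite author's own statement) =====
-- stated objective: idiomatic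
-- what changed: B first partitions the repos into explicit rows of two and nests a row loop inside a chunk loop with a chunk-index row-break, replacing A's single flat loop whose row breaks are decided by an index-modulo test.
import Mathlib
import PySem

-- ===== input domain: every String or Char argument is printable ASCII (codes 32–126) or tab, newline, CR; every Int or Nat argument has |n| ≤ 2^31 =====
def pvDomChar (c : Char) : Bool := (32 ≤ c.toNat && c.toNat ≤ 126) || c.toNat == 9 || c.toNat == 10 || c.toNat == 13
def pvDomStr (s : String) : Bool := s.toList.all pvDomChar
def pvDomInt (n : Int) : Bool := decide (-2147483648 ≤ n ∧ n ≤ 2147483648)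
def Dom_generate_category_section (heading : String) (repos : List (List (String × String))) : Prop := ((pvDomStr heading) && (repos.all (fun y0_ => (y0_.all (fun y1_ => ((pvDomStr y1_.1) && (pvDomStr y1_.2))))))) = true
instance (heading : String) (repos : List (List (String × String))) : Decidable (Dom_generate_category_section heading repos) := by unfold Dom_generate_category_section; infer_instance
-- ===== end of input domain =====

-- B replaces A's flat loop with an index-modulo row-break test by an explicit
-- partition of the repos into rows of two and a nested chunk/row loop (idiomatic).

-- ===== PORT A =====
-- repo["name"] / repo["url"]: first-match lookup; Pre_ guarantees both keys exist
def pv_card (repo : List (String × String)) : String :=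
  let name := (repo.lookup "name").getD ""
  let url := (repo.lookup "url").getD ""
  "<a href=\"" ++ url ++ "\">\n        <picture>\n          <source media=\"(prefers-color-scheme: dark)\" srcset=\"cards/" ++ name ++ "-dark.svg\">\n          <img src=\"cards/" ++ name ++ "-light.svg\" alt=\"" ++ name ++ "\" width=\"400\">\n        </picture>\n      </a>"

def pv_td (repo : List (String × String)) : String :=
  "<td>\n      " ++ pv_card repo ++ "\n    </td>"

def generate_category_section (heading : String) (repos : List (List (String × String))) : String :=
  let lines : List String := ["### " ++ heading ++ "\n"]
  let lines := lines ++ ["<table><tr>"]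
  let lines := (PySem.List.enumerate repos).foldl
    (fun acc p =>
      (if p.1 > 0 && PySem.Int.mod p.1 2 == 0 then acc ++ ["</tr><tr>"] else acc)
      ++ [pv_td p.2]) lines
  let lines := lines ++ ["</tr></table>\n"]
  PySem.Str.join "\n" lines

-- ===== PORT B =====
-- the while-loop 'rest[:2] / rest[2:]' chunking
def pv_chunks2 {α : Type} : List α → List (List α)
  | [] => []
  | [r] => [[r]]
  | r1 :: r2 :: rest => [r1, r2] :: pv_chunks2 rest

def generate_category_section_alt (heading : String) (repos : List (List (String × String))) : String :=
  let chunks := pv_chunks2 repos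
  let lines : List String := ["### " ++ heading ++ "\n", "<table><tr>"]
  let lines := (PySem.List.enumerate chunks).foldl
    (fun acc p =>
      (if p.1 > 0 then acc ++ ["</tr><tr>"] else acc).append
        (p.2.map (fun r => pv_td r))) lines
  let lines := lines ++ ["</tr></table>\n"]
  PySem.Str.join "\n" lines

-- ===== PRECONDITION & SPEC =====
-- Pre_ excludes exactly the repos lacking a "name" or "url" key, on which Python A raises KeyError
def Pre_generate_category_section (heading : String) (repos : List (List (String × String))) : Prop :=
  ∀ r ∈ repos, (r.lookup "name").isSome ∧ (r.lookup "url").isSome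
instance (heading : String) (repos : List (List (String × String))) : Decidable (Pre_generate_category_section heading repos) := by unfold Pre_generate_category_section; infer_instance
def pvWitness_generate_category_section : String × (List (List (String × String))) :=
  ("Tools", [[("name", "a"), ("url", "u")], [("name", "b"), ("url", "v")], [("name", "c"), ("url", "w")]])

def Spec_generate_category_section (heading : String) (repos : List (List (String × String))) (out : String) : Prop := out = generate_category_section_alt heading repos
instance (heading : String) (repos : List (List (String × String))) (out : String) : Decidable (Spec_generate_category_section heading repos out) := by unfold Spec_generate_category_section; infer_instance

-- ===== CLAIM (what is proved, stated in full; the proofs are below) =====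
def Claim_equal_generate_category_section : Prop := ∀ (heading : String) (repos : List (List (String × String))), Dom_generate_category_section heading repos → Pre_generate_category_section heading repos → Spec_generate_category_section heading repos (generate_category_section heading repos)

-- ===== LEMMAS AND PROOFS =====

-- abbreviations for the two loop bodies (exactly the lambdas in the ports)
def pv_fA (acc : List String) (p : Int × List (String × String)) : List String :=
  (if p.1 > 0 && PySem.Int.mod p.1 2 == 0 then acc ++ ["</tr><tr>"] else acc) ++ [pv_td p.2]

def pv_fB (acc : List String) (p : Int × List (List (String × String))) : List String :=
  (if p.1 > 0 then acc ++ ["</tr><tr>"] else acc).append (p.2.map (fun r => pv_td r))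

theorem pv_modc (s : Int) (h : s % 2 = 0) :
    PySem.Int.mod s 2 = 0 ∧ PySem.Int.mod (s + 1) 2 = 1 ∧ (2:Int) ∣ s ∧ ¬ (2:Int) ∣ (s + 1) := by
  rw [PySem.Int.mod_eq_emod_of_pos (by norm_num : (0:Int) < 2),
      PySem.Int.mod_eq_emod_of_pos (by norm_num : (0:Int) < 2)]
  refine ⟨by omega, by omega, Int.dvd_of_emod_eq_zero h, by omega⟩

-- main two-at-a-time invariant: from an even positive A-index s and a positive B-index t,
-- the two folds agree for every accumulator
theorem pv_main (l : List (List (String × String))) :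
    ∀ (s t : Int), 0 < s → s % 2 = 0 → 0 < t → ∀ acc : List String,
      (PySem.List.enumerate l s).foldl pv_fA acc
        = (PySem.List.enumerate (pv_chunks2 l) t).foldl pv_fB acc := by
  induction l using pv_chunks2.induct with
  | case1 => intro s t _ _ _ acc; simp [pv_chunks2, PySem.List.enumerate_nil]
  | case2 r =>
      intro s t hs hmod ht acc
      have hc := pv_modc s hmod
      simp only [pv_chunks2, PySem.List.enumerate_cons, PySem.List.enumerate_nil,
        List.foldl_cons, List.foldl_nil, pv_fA, pv_fB]
      simp [hs, ht, hc.2.2.1]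
  | case3 r1 r2 rest ih =>
      intro s t hs hmod ht acc
      have hc := pv_modc s hmod
      simp only [pv_chunks2, PySem.List.enumerate_cons, List.foldl_cons]
      rw [show s + 1 + 1 = s + 2 by ring,
          ih (s + 2) (t + 1) (by omega) (by omega) (by omega)]
      congr 1
      simp only [pv_fA, pv_fB]
      simp [hs, ht, hc.2.2.1, hc.2.2.2]

-- top level: both folds start at index 0 (no break before the first row)
theorem pv_main0 (l : List (List (String × String))) (acc : List String) :
    (PySem.List.enumerate l 0).foldl pv_fA acc
      = (PySem.List.enumerate (pv_chunks2 l) 0).foldl pv_fB acc := by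
  cases l with
  | nil => simp [pv_chunks2, PySem.List.enumerate_nil]
  | cons r1 rest =>
    cases rest with
    | nil =>
        simp only [pv_chunks2, PySem.List.enumerate_cons, PySem.List.enumerate_nil,
          List.foldl_cons, List.foldl_nil, pv_fA, pv_fB]
        simp
    | cons r2 rest2 =>
        simp only [pv_chunks2, PySem.List.enumerate_cons, List.foldl_cons]
        rw [show (0:Int) + 1 + 1 = 2 by norm_num, show (0:Int) + 1 = 1 by norm_num,
          pv_main rest2 2 1 (by omega) (by omega) (by omega)]
        congr 1
        have hc := pv_modc 0 (by omega)
        simp only [pv_fA, pv_fB]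
        simp

-- ===== VERDICT (by name: the statement is the Claim_ definition above) =====
theorem generate_category_section_spec : Claim_equal_generate_category_section := by
  intro heading repos _ _
  show _ = _
  unfold generate_category_section generate_category_section_alt
  simp only []
  congr 2
  exact pv_main0 repos _
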